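-- pv_equiv track=rewrite | github.com/candyer/codechef | January Cook-Off 2020/RGAND/RGAND.py | solve
-- ===== SOURCE A (Python) =====
-- def solve(l, r):
-- 	mod = 10**9 + 7
-- 	binary = bin(l)[2:]
-- 	a, b, res = 1, 0, 0
-- 	for i in range(len(binary) - 1, -1, -1):
-- 		if binary[i] == '1':
-- 			res += a * min(a - b, r - l + 1)
-- 			res %= mod
-- 			b += a
-- 		a *= 2
-- 	return res
-- ===== SOURCE B (Python) =====
-- def solve(l, r):
--     # Sums AND(l..x) for x in [l, r] as a step function: the running AND `cur`
--     # loses its lowest set bit at each carry threshold, so add cur * (segment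
--     # length) per segment instead of an independent per-bit term.
--     mod = 10**9 + 7
--     n = r - l + 1
--     res, prev, cur = 0, 0, l
--     while cur:
--         nxt = cur & (cur - 1)        # cur with its lowest set bit removed
--         low = cur - nxt              # that lowest set bit
--         m = min(low - (l & (low - 1)), n)
--         res = (res + cur * (m - prev)) % mod
--         prev = m
--         cur = nxt
--     return res
-- ===== Notes on version B (the rewrite author's own statement) =====
-- stated objective: alternative
-- what changed: B evaluates the sum of AND(l..x) over x in [l,r] as a step function: it walks the set bits of l low-to-high by stripping the lowest set bit (cur &= cur-1), maintains the current AND value cur and the previous carry threshold, and adds cur * (segment length) per segment of constant AND value; A instead scans the bin(l) string high-to-low adding an independent per-bit term a*min(a-b, r-l+1) with a running low-bits accumulator b.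
-- outside the precondition, e.g. on solve(-5, 3): A returns 13, B does not finish within the time limit
import Mathlib
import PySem

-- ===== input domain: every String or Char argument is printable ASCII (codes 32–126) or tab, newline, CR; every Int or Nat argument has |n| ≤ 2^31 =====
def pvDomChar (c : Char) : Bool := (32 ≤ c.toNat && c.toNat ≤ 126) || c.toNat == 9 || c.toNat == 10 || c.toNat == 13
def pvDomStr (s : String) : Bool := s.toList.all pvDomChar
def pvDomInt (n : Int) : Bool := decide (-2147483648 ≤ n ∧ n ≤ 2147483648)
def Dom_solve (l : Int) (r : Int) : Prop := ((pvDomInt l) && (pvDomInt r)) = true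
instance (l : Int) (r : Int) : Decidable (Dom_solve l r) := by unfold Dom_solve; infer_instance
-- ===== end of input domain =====

-- B sums AND(l..x) over x in [l,r] as a step function by segments of constant AND value,
-- stripping the lowest set bit of the running AND, instead of A's per-bit bin(l)-string
-- scan with a low-bits accumulator (objective: alternative).

-- ===== PORT A =====
-- binary digits of n (most significant first); natBits 0 = []
def natBits (n : Nat) : List Char :=
  if h : n = 0 then []
  else natBits (n / 2) ++ [if n % 2 = 1 then '1' else '0']
decreasing_by exact Nat.div_lt_self (Nat.pos_of_ne_zero h) one_lt_two

-- bin(l)[2:] : for l < 0 Python yields '-0b…' and [2:] leaves 'b' ++ digits(-l)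
def binNoPrefix (l : Int) : List Char :=
  if l < 0 then 'b' :: natBits (-l).toNat
  else if l = 0 then ['0']
  else natBits l.toNat

-- one iteration of A's for-loop; state (a, b, res), read at index i = chars from the end
def stepA (l r : Int) (s : Int × Int × Int) (c : Char) : Int × Int × Int :=
  if c = '1' then
    (s.1 * 2, s.2.1 + s.1,
     PySem.Int.mod (s.2.2 + s.1 * min (s.1 - s.2.1) (r - l + 1)) (10 ^ 9 + 7))
  else (s.1 * 2, s.2.1, s.2.2)

def solve (l : Int) (r : Int) : Int :=
  (List.foldl (stepA l r) (1, 0, 0) (binNoPrefix l).reverse).2.2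

-- ===== PORT B =====
-- termination helper for the while-loop: clearing the lowest set bit shrinks cur
lemma land_pred_toNat_lt (cur : Int) (h : 0 < cur) :
    (Int.land cur (cur - 1)).toNat < cur.toNat := by
  obtain ⟨c, rfl⟩ : ∃ c : Nat, cur = (c : Int) := ⟨cur.toNat, (Int.toNat_of_nonneg h.le).symm⟩
  have hc : 0 < c := by exact_mod_cast h
  have h1 : (c : Int) - 1 = ((c - 1 : Nat) : Int) := by omega
  rw [h1]
  have h2 : Int.land (c : Int) ((c - 1 : Nat) : Int) = ((c &&& (c - 1) : Nat) : Int) := rfl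
  rw [h2, Int.toNat_natCast, Int.toNat_natCast]
  have := Nat.and_le_right (n := c) (m := c - 1)
  omega

-- while cur: nxt = cur & (cur-1); low = cur - nxt; m = min(low - (l & (low-1)), n);
--            res = (res + cur*(m - prev)) % mod; prev = m; cur = nxt
-- (guard 0 < cur instead of cur ≠ 0 only for totality: Python's loop diverges for cur < 0)
def segLoop (l n cur prev res : Int) : Int :=
  if h : 0 < cur then
    segLoop l n (Int.land cur (cur - 1))
      (min ((cur - Int.land cur (cur - 1)) - Int.land l ((cur - Int.land cur (cur - 1)) - 1)) n)
      (PySem.Int.mod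
        (res + cur * (min ((cur - Int.land cur (cur - 1)) - Int.land l ((cur - Int.land cur (cur - 1)) - 1)) n - prev))
        (10 ^ 9 + 7))
  else res
termination_by cur.toNat
decreasing_by exact land_pred_toNat_lt cur h

def solve_alt (l : Int) (r : Int) : Int := segLoop l (r - l + 1) l 0 0

-- ===== PRECONDITION & SPEC =====
-- Pre_ restricts to the problem's natural domain l ≥ 0 (CodeChef guarantees 1 ≤ l ≤ r):
-- for negative l, Python's bin(l)[2:] strips '-0' and leaves a stray 'b' in the scanned
-- string, so A's returned value there is an accident of the slicing (and B's loop diverges).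
def Pre_solve (l : Int) (r : Int) : Prop := 0 ≤ l
instance (l : Int) (r : Int) : Decidable (Pre_solve l r) := by unfold Pre_solve; infer_instance

def pvWitness_solve : Int × Int := (5, 9)

def Spec_solve (l : Int) (r : Int) (out : Int) : Prop := out = solve_alt l r
instance (l : Int) (r : Int) (out : Int) : Decidable (Spec_solve l r out) := by unfold Spec_solve; infer_instance

-- ===== CLAIM =====
def Claim_equal_solve : Prop := ∀ (l : Int) (r : Int), Dom_solve l r → Pre_solve l r → Spec_solve l r (solve l r)

-- ===== LEMMAS AND PROOFS =====
-- reference recursion for A: n = remaining high bits, a = 2^i, b = value of processed low bits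
def rgandGo (l r : Int) (n : Nat) (a b res : Int) : Int :=
  if h : n = 0 then res
  else rgandGo l r (n / 2) (a * 2) (b + if n % 2 = 1 then a else 0)
        (if n % 2 = 1 then PySem.Int.mod (res + a * min (a - b) (r - l + 1)) (10 ^ 9 + 7) else res)
decreasing_by exact Nat.div_lt_self (Nat.pos_of_ne_zero h) one_lt_two

lemma foldA (l r : Int) (n : Nat) : ∀ a b res : Int, n ≠ 0 →
    (List.foldl (stepA l r) (a, b, res) (natBits n).reverse).2.2 = rgandGo l r n a b res := by
  induction n using Nat.strong_induction_on with
  | _ n ih =>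
    intro a b res hn
    rw [natBits, rgandGo]
    simp only [hn, dite_false, List.reverse_append, List.reverse_singleton, List.singleton_append,
      List.foldl_cons]
    by_cases h2 : n / 2 = 0
    · rw [h2, natBits, rgandGo]
      simp only [dite_true, List.reverse_nil, List.foldl_nil]
      by_cases hb : n % 2 = 1 <;> simp [stepA, hb]
    · rw [← ih (n / 2) (Nat.div_lt_self (Nat.pos_of_ne_zero hn) one_lt_two) _ _ _ h2]
      by_cases hb : n % 2 = 1 <;> simp [stepA, hb]

lemma solve_eq_go (nl : Nat) (r : Int) : solve (nl : Int) r = rgandGo (nl : Int) r nl 1 0 0 := by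
  unfold solve binNoPrefix
  by_cases h0 : nl = 0
  · subst h0
    rw [rgandGo]
    norm_num [stepA, List.foldl_cons, List.foldl_nil]
    rw [if_neg (by decide : ¬ ('0' = '1'))]
  · have h1 : ¬ ((nl : Int) < 0) := not_lt.mpr (Int.natCast_nonneg nl)
    have h2 : ¬ ((nl : Int) = 0) := by exact_mod_cast h0
    rw [if_neg h1, if_neg h2, Int.toNat_natCast]
    exact foldA (nl : Int) r nl 1 0 0 h0

-- pure (un-modded) sum computed by A's loop
def sumA (N : Int) (n : Nat) (a b : Int) : Int :=
  if h : n = 0 then 0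
  else (if n % 2 = 1 then a * min (a - b) N else 0)
        + sumA N (n / 2) (a * 2) (b + if n % 2 = 1 then a else 0)
decreasing_by exact Nat.div_lt_self (Nat.pos_of_ne_zero h) one_lt_two

-- pure (un-modded) sum computed by B's loop
def sumB (l N cur prev : Int) : Int :=
  if h : 0 < cur then
    cur * (min ((cur - Int.land cur (cur - 1)) - Int.land l ((cur - Int.land cur (cur - 1)) - 1)) N - prev)
      + sumB l N (Int.land cur (cur - 1))
          (min ((cur - Int.land cur (cur - 1)) - Int.land l ((cur - Int.land cur (cur - 1)) - 1)) N)
  else 0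
termination_by cur.toNat
decreasing_by exact land_pred_toNat_lt cur h

lemma pymod_eq_emod (x : Int) : PySem.Int.mod x (10 ^ 9 + 7) = x % (10 ^ 9 + 7) :=
  PySem.Int.mod_eq_emod_of_pos (by norm_num)

lemma emod_shift (a s : Int) : (a % (10 ^ 9 + 7) + s) % (10 ^ 9 + 7) = (a + s) % (10 ^ 9 + 7) := by
  conv_lhs => rw [Int.add_emod, Int.emod_emod_of_dvd _ dvd_rfl, ← Int.add_emod]

lemma modA (l r : Int) (n : Nat) : ∀ a b res : Int, 0 ≤ res → res < 10 ^ 9 + 7 →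
    rgandGo l r n a b res = (res + sumA (r - l + 1) n a b) % (10 ^ 9 + 7) := by
  induction n using Nat.strong_induction_on with
  | _ n ih =>
    intro a b res h0 h1
    rw [rgandGo, sumA]
    by_cases hn : n = 0
    · rw [dif_pos hn, dif_pos hn, add_zero]
      exact (Int.emod_eq_of_lt h0 h1).symm
    · simp only [hn, dite_false]
      by_cases hb : n % 2 = 1
      · simp only [hb, if_true, pymod_eq_emod]
        rw [ih (n / 2) (Nat.div_lt_self (Nat.pos_of_ne_zero hn) one_lt_two) _ _ _
            (Int.emod_nonneg _ (by norm_num)) (Int.emod_lt_of_pos _ (by norm_num))]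
        rw [emod_shift]; ring_nf
      · simp only [hb, if_false]
        rw [ih (n / 2) (Nat.div_lt_self (Nat.pos_of_ne_zero hn) one_lt_two) _ _ _ h0 h1]
        ring_nf

lemma modB (l N : Int) (c : Nat) : ∀ prev res : Int, 0 ≤ res → res < 10 ^ 9 + 7 →
    segLoop l N (c : Int) prev res = (res + sumB l N (c : Int) prev) % (10 ^ 9 + 7) := by
  induction c using Nat.strong_induction_on with
  | _ c ih =>
    intro prev res h0 h1
    rw [segLoop, sumB]
    by_cases hc : 0 < (c : Int)
    · simp only [hc, dite_true, pymod_eq_emod]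
      have hlt := land_pred_toNat_lt (c : Int) hc
      rw [Int.toNat_natCast] at hlt
      have hland : Int.land (c : Int) ((c : Int) - 1) = ((Int.land (c : Int) ((c : Int) - 1)).toNat : Int) := by
        have hcn : 0 < c := by exact_mod_cast hc
        have h1' : (c : Int) - 1 = ((c - 1 : Nat) : Int) := by omega
        rw [h1']
        rfl
      rw [hland]
      rw [ih _ hlt _ _ (Int.emod_nonneg _ (by norm_num)) (Int.emod_lt_of_pos _ (by norm_num))]
      rw [emod_shift]; ring_nf
    · rw [dif_neg hc, dif_neg hc, add_zero]
      exact (Int.emod_eq_of_lt h0 h1).symm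

-- bit fact: for odd n, (2^k * n) &&& (2^k * n - 1) = 2^k * (n - 1)
lemma land_pred_of_odd (k : Nat) : ∀ n : Nat, n % 2 = 1 →
    (2 ^ k * n) &&& (2 ^ k * n - 1) = 2 ^ k * (n - 1) := by
  induction k with
  | zero =>
    intro n hn
    obtain ⟨m, rfl⟩ : ∃ m, n = 2 * m + 1 := ⟨n / 2, by omega⟩
    simp only [pow_zero, one_mul]
    have he : 2 * m + 1 - 1 = 2 * m := by omega
    rw [he]
    apply Nat.eq_of_testBit_eq
    intro i
    cases i with
    | zero =>
      rw [Nat.testBit_and]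
      simp only [Nat.testBit_zero]
      have e1 : (2 * m + 1) % 2 = 1 := by omega
      have e2 : (2 * m) % 2 = 0 := by omega
      simp [e1, e2]
    | succ j =>
      rw [Nat.testBit_and, Nat.testBit_succ, Nat.testBit_succ]
      have h1 : (2 * m + 1) / 2 = m := by omega
      have h2 : (2 * m) / 2 = m := by omega
      rw [h1, h2, Bool.and_self]
  | succ k ih =>
    intro n hn
    have hc : 0 < 2 ^ k * n := Nat.mul_pos (Nat.two_pow_pos k) (by omega)
    set c := 2 ^ k * n with hcdef
    have he1 : 2 ^ (k + 1) * n = 2 * c := by rw [hcdef]; ring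
    have hr : 2 ^ (k + 1) * (n - 1) = 2 * (2 ^ k * (n - 1)) := by rw [pow_succ]; ring
    rw [he1]
    apply Nat.eq_of_testBit_eq
    intro i
    cases i with
    | zero =>
      rw [Nat.testBit_and, hr]
      simp only [Nat.testBit_zero]
      have e1 : (2 * c) % 2 = 0 := by omega
      have e2 : (2 * (2 ^ k * (n - 1))) % 2 = 0 := by omega
      simp [e1, e2]
    | succ j =>
      rw [Nat.testBit_and, hr, Nat.testBit_succ, Nat.testBit_succ, Nat.testBit_succ]
      have h1 : (2 * c) / 2 = c := by omega
      have h2 : (2 * c - 1) / 2 = c - 1 := by omega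
      have h3 : (2 * (2 ^ k * (n - 1))) / 2 = 2 ^ k * (n - 1) := by omega
      rw [h1, h2, h3, ← Nat.testBit_and, ih n hn]

-- mask fact as Int: l & (2^k - 1) = l % 2^k for l = ↑nl
lemma land_mask (nl k : Nat) :
    Int.land (nl : Int) (((2 ^ k : Nat) : Int) - 1) = ((nl % 2 ^ k : Nat) : Int) := by
  have h1 : ((2 ^ k : Nat) : Int) - 1 = ((2 ^ k - 1 : Nat) : Int) := by
    have := Nat.one_le_two_pow (n := k)
    omega
  rw [h1]
  have h2 : Int.land (nl : Int) ((2 ^ k - 1 : Nat) : Int) = ((nl &&& (2 ^ k - 1) : Nat) : Int) := rfl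
  rw [h2, Nat.and_two_pow_sub_one_eq_mod]

-- the Abel-summation bridge: B's segment sum vs A's per-bit sum
lemma bridge (nl : Nat) (N : Int) : ∀ n : Nat, ∀ k : Nat, ∀ prev : Int, nl / 2 ^ k = n →
    sumB (nl : Int) N ((2 ^ k * n : Nat) : Int) prev
      = sumA N n ((2 ^ k : Nat) : Int) ((nl % 2 ^ k : Nat) : Int) - prev * ((2 ^ k * n : Nat) : Int) := by
  intro n
  induction n using Nat.strong_induction_on with
  | _ n ih =>
    intro k prev hk
    rw [sumA]
    by_cases hn : n = 0
    · rw [sumB]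
      simp [hn]
    · have hpos : 0 < ((2 ^ k * n : Nat) : Int) := by
        exact_mod_cast Nat.mul_pos (Nat.two_pow_pos k) (Nat.pos_of_ne_zero hn)
      simp only [hn, dite_false]
      have hstep : nl % 2 ^ (k + 1) = nl % 2 ^ k + 2 ^ k * (n % 2) := by
        have := Nat.mod_pow_succ (x := nl) (k := k) (b := 2)
        rw [hk] at this
        omega
      have hdiv : nl / 2 ^ (k + 1) = n / 2 := by
        rw [pow_succ, ← Nat.div_div_eq_div_mul, hk]
      have hc2 : ((2 ^ (k + 1) : Nat) : Int) = ((2 ^ k : Nat) : Int) * 2 := by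
        push_cast [pow_succ]; ring
      by_cases hb : n % 2 = 1
      · -- odd bit: B strips exactly bit k, both add the same term
        rw [sumB]
        simp only [hpos, dite_true]
        have hland : Int.land ((2 ^ k * n : Nat) : Int) (((2 ^ k * n : Nat) : Int) - 1)
            = ((2 ^ k * (n - 1) : Nat) : Int) := by
          have h1 : ((2 ^ k * n : Nat) : Int) - 1 = ((2 ^ k * n - 1 : Nat) : Int) := by omega
          rw [h1]
          have h2 : Int.land ((2 ^ k * n : Nat) : Int) ((2 ^ k * n - 1 : Nat) : Int)
              = (((2 ^ k * n) &&& (2 ^ k * n - 1) : Nat) : Int) := rfl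
          rw [h2, land_pred_of_odd k n hb]
        rw [hland]
        have hlow : ((2 ^ k * n : Nat) : Int) - ((2 ^ k * (n - 1) : Nat) : Int)
            = ((2 ^ k : Nat) : Int) := by
          have h1 : ((n - 1 : Nat) : Int) = (n : Int) - 1 := by
            have := Nat.pos_of_ne_zero hn; omega
          push_cast [h1]
          ring
        rw [hlow, land_mask]
        have hnext : 2 ^ k * (n - 1) = 2 ^ (k + 1) * (n / 2) := by
          have hpow : 2 ^ (k + 1) * (n / 2) = 2 ^ k * (2 * (n / 2)) := by rw [pow_succ]; ring
          have h2o : 2 * (n / 2) = n - 1 := by omega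
          rw [hpow, h2o]
        have hmod : ((nl % 2 ^ (k + 1) : Nat) : Int)
            = ((nl % 2 ^ k : Nat) : Int) + ((2 ^ k : Nat) : Int) := by
          rw [hstep, hb]
          push_cast
          ring
        rw [hnext]
        rw [ih (n / 2) (Nat.div_lt_self (Nat.pos_of_ne_zero hn) one_lt_two) (k + 1) _ hdiv]
        simp only [hb, if_true]
        rw [hmod, hc2]
        have hcurnext : ((2 ^ (k + 1) * (n / 2) : Nat) : Int)
            = ((2 ^ k * n : Nat) : Int) - ((2 ^ k : Nat) : Int) := by
          rw [← hnext]
          have h1 : ((n - 1 : Nat) : Int) = (n : Int) - 1 := by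
            have := Nat.pos_of_ne_zero hn; omega
          push_cast [h1]
          ring
        rw [hcurnext]
        ring
      · -- even bit: cur has no bit at position k; B's state is unchanged, A adds nothing
        have hb0 : n % 2 = 0 := by omega
        have hnext : 2 ^ k * n = 2 ^ (k + 1) * (n / 2) := by
          have hpow : 2 ^ (k + 1) * (n / 2) = 2 ^ k * (2 * (n / 2)) := by rw [pow_succ]; ring
          have h2e : 2 * (n / 2) = n := by omega
          rw [hpow, h2e]
        have hmod : nl % 2 ^ (k + 1) = nl % 2 ^ k := by rw [hstep, hb0]; omega
        have hrec := ih (n / 2) (Nat.div_lt_self (Nat.pos_of_ne_zero hn) one_lt_two) (k + 1) prev hdiv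
        rw [← hnext, hmod, hc2] at hrec
        rw [hrec]
        simp only [hb, if_false]
        ring

lemma solve_alt_eq (nl : Nat) (r : Int) :
    solve_alt (nl : Int) r = (sumB (nl : Int) (r - (nl : Int) + 1) (nl : Int) 0) % (10 ^ 9 + 7) := by
  unfold solve_alt
  have := modB (nl : Int) (r - (nl : Int) + 1) nl 0 0 le_rfl (by norm_num)
  simpa using this

-- ===== VERDICT =====
theorem solve_spec : Claim_equal_solve := by
  intro l r _ hpre
  unfold Spec_solve
  obtain ⟨nl, rfl⟩ : ∃ n : Nat, l = (n : Int) := ⟨l.toNat, (Int.toNat_of_nonneg hpre).symm⟩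
  rw [solve_eq_go, solve_alt_eq, modA _ _ _ _ _ _ le_rfl (by norm_num)]
  have hb := bridge nl (r - (nl : Int) + 1) nl 0 0 (by simp)
  simp only [pow_zero, one_mul, Nat.mod_one, Nat.cast_zero, Nat.cast_one, zero_mul, sub_zero] at hb
  rw [hb, zero_add]
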